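-- pv_equiv track=rewrite | github.com/TrellixVulnTeam/CMPUT_274_Exercises_KYO3 | Exercise_4/preprocess/preprocess.py | rem_digits
-- ===== SOURCE A (Python) =====
-- def both_present(word: str):
--     '''Returns true if both integers and characters are present in word
--     '''
--     digits = "0123456789"
--     alphabets = "ABCDEFGHIJKLMNOPQRSTUVWXYZabcdefghijklmnopqrstuvwxyz"
--     symbols = "~!@#$%^&*()_-+=`<>?/.,\|}{[]''"":;"
--
--     d = False
--     a = False
--
--     for char in word:
--     	if char in digits:
--     	    d = True
--     	if (char in alphabets) or (char in symbols):
--     	    a = True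
--     return (d and a)
--
-- def rem_digits(word: str):
--     ''' Removes all integers from a word if both_present returns true
--     '''
--
--     digits = "0123456789"
--     if both_present(word) == True:
--         new_word = ''
--         for char in word:
--             if char not in digits:
--                 new_word = new_word + char
--         return new_word
--     else:
--         return word
-- ===== SOURCE B (Python) =====
-- def rem_digits(word: str):
--     '''Removes all digits from word if digits and letters/symbols both occur (single pass).'''
--     digits = "0123456789"
--     letters_or_symbols = ("ABCDEFGHIJKLMNOPQRSTUVWXYZabcdefghijklmnopqrstuvwxyz"
--                           "~!@#$%^&*()_-+=`<>?/.,\|}{[]''"":;")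
--     saw_digit = False
--     saw_other = False
--     kept = []
--     for char in word:
--         if char in digits:
--             saw_digit = True
--         else:
--             kept.append(char)
--             if char in letters_or_symbols:
--                 saw_other = True
--     return ''.join(kept) if saw_digit and saw_other else word
-- ===== Notes on version B (the rewrite author's own statement) =====
-- stated objective: simpler
-- what changed: Replaced A's separate both_present pre-scan plus filtering loop (two passes over word) with a single loop that accumulates non-digit characters while tracking the saw-digit and saw-letter/symbol flags, deciding at the end whether to return the filtered string or the original word.
import Mathlib
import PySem

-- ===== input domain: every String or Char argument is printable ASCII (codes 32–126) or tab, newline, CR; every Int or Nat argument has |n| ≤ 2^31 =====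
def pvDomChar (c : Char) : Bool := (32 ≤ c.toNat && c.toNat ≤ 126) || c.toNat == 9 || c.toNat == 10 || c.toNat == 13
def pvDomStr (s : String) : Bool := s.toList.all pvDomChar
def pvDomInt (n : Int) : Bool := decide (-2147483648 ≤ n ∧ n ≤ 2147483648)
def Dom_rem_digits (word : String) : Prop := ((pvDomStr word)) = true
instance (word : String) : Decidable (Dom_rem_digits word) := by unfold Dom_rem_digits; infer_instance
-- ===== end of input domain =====

-- B merges A's both_present pre-scan and the filtering loop into ONE pass that tracks
-- the two booleans while accumulating the non-digit characters (objective: simpler).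

-- ===== PORT A =====
def pvDigits : List Char := "0123456789".toList
def pvAlphabets : List Char := "ABCDEFGHIJKLMNOPQRSTUVWXYZabcdefghijklmnopqrstuvwxyz".toList
def pvSymbols : List Char := "~!@#$%^&*()_-+=`<>?/.,\\|}{[]'':;".toList

-- 'char in <literal>' on a 1-char loop variable is membership in the literal's characters (exact)
def pvIsDig (c : Char) : Bool := pvDigits.contains c
def pvIsAl (c : Char) : Bool := pvAlphabets.contains c || pvSymbols.contains c

-- loop body of both_present: set d on a digit, set a on a letter/symbol
def bpStep (s : Bool × Bool) (c : Char) : Bool × Bool :=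
  ((if pvIsDig c then true else s.1), (if pvIsAl c then true else s.2))

def both_present (word : String) : Bool :=
  let p := word.toList.foldl bpStep (false, false)
  p.1 && p.2

-- loop body of rem_digits' filtering loop: append char unless it is a digit
def filtStep (acc : List Char) (c : Char) : List Char :=
  if pvIsDig c then acc else acc ++ [c]

def rem_digits (word : String) : String :=
  if both_present word = true then
    String.ofList (word.toList.foldl filtStep [])
  else
    word

-- ===== PORT B =====
-- B's single loop body: state = (kept chars, saw_digit, saw_other)
def altStep (st : List Char × Bool × Bool) (c : Char) : List Char × Bool × Bool :=
  if pvIsDig c then (st.1, true, st.2.2)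
  else (st.1 ++ [c], st.2.1, (if pvIsAl c then true else st.2.2))

def rem_digits_alt (word : String) : String :=
  let s := word.toList.foldl altStep ([], false, false)
  if s.2.1 && s.2.2 then String.ofList s.1 else word

-- ===== PRECONDITION & SPEC =====
def Spec_rem_digits (word : String) (out : String) : Prop := out = rem_digits_alt word
instance (word : String) (out : String) : Decidable (Spec_rem_digits word out) := by unfold Spec_rem_digits; infer_instance

-- ===== CLAIM (what is proved, stated in full; the proofs are below) =====
def Claim_equal_rem_digits : Prop := ∀ (word : String), Dom_rem_digits word → Spec_rem_digits word (rem_digits word)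

-- ===== LEMMAS AND PROOFS =====

-- digit characters are never letters/symbols: the two literal alphabets are disjoint
lemma dig_not_al {c : Char} (h : pvIsDig c = true) : pvIsAl c = false := by
  have hall : pvDigits.all (fun c => !(pvIsAl c)) = true := by decide
  have hm : c ∈ pvDigits := by
    simpa [pvIsDig, List.contains_iff_mem] using h
  simpa using List.all_eq_true.mp hall c hm

lemma altFold_fst (l : List Char) (acc : List Char) (d a : Bool) :
    (l.foldl altStep (acc, d, a)).1 = l.foldl filtStep acc := by
  induction l generalizing acc d a with
  | nil => rfl
  | cons c l ih =>
    by_cases h : pvIsDig c = true <;> simp [altStep, filtStep, h, ih]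

lemma altFold_d (l : List Char) (acc : List Char) (d a : Bool) :
    (l.foldl altStep (acc, d, a)).2.1 = (d || l.any pvIsDig) := by
  induction l generalizing acc d a with
  | nil => simp
  | cons c l ih =>
    by_cases h : pvIsDig c = true <;> simp [altStep, h, ih]

lemma altFold_a (l : List Char) (acc : List Char) (d a : Bool) :
    (l.foldl altStep (acc, d, a)).2.2 = (a || l.any pvIsAl) := by
  induction l generalizing acc d a with
  | nil => simp
  | cons c l ih =>
    by_cases h : pvIsDig c = true
    · simp [altStep, h, ih, dig_not_al h]
    · by_cases h2 : pvIsAl c = true <;> simp [altStep, h, h2, ih]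

lemma bpFold_eq (l : List Char) (d a : Bool) :
    l.foldl bpStep (d, a) = (d || l.any pvIsDig, a || l.any pvIsAl) := by
  induction l generalizing d a with
  | nil => simp
  | cons c l ih =>
    by_cases h : pvIsDig c = true <;> by_cases h2 : pvIsAl c = true <;>
      simp [bpStep, h, h2, ih]

-- ===== VERDICT (by name: the statement is the Claim_ definition above) =====
theorem rem_digits_spec : Claim_equal_rem_digits := by
  intro word _
  unfold Spec_rem_digits rem_digits rem_digits_alt both_present
  simp only [bpFold_eq, altFold_fst, altFold_d, altFold_a]
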